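-- pv_equiv track=rewrite | github.com/MrBrantCode/unitest_baseline | mut_generate/mist_train_cf/cf_19381/solution.py | get_max_prime_with_pattern
-- ===== SOURCE A (Python) =====
-- import math
--
-- def is_prime(n):
--     if n <= 1:
--         return False
--     for i in range(2, int(math.sqrt(n)) + 1):
--         if n % i == 0:
--             return False
--     return True
--
-- def get_max_prime_with_pattern(arr):
--     max_prime = -1
--     for num in arr:
--         if is_prime(num):
--             digit_sum = sum(int(digit) for digit in str(num))
--             if digit_sum % 3 == 0:
--                 max_prime = max(max_prime, num)
--     return max_prime
-- ===== SOURCE B (Python) =====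
-- def get_max_prime_with_pattern(arr):
--     # A prime whose digit sum is divisible by 3 is itself divisible by 3,
--     # hence the only candidate is 3.
--     return 3 if 3 in arr else -1
-- ===== Notes on version B (the rewrite author's own statement) =====
-- stated objective: faster
-- what changed: Replaced the per-element trial-division primality test and digit-sum scan by the number-theoretic fact that the only prime with digit sum divisible by 3 is 3, so B is a single membership test 'return 3 if 3 in arr else -1'.
import Mathlib
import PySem

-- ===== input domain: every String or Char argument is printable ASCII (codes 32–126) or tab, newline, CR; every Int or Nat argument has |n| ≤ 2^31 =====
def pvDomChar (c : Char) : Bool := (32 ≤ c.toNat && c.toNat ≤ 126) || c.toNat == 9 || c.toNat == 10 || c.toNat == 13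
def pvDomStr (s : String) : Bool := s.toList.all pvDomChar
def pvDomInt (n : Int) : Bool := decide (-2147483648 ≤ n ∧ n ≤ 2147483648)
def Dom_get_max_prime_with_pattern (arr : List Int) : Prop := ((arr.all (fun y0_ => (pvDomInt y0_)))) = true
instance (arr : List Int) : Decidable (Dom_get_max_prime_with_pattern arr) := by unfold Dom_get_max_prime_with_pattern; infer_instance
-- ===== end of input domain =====

-- B replaces A's per-element trial-division + digit-sum test by the fact that the
-- only prime with digit sum divisible by 3 is 3, so it is a single membership test (faster).


-- ===== PORT A =====
-- is_prime(n): trial division over range(2, int(math.sqrt(n)) + 1); the early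
-- 'return False' loop is List.all.  int(math.sqrt(n)) is ported as Nat.sqrt,
-- exact for 2 ≤ n ≤ 2^31 (double sqrt is correctly rounded there).
def is_prime (n : Int) : Bool :=
  if n ≤ 1 then false
  else
    (PySem.List.pyRange 2 ((Nat.sqrt n.toNat : Int) + 1) 1).all
      (fun i => !(PySem.Int.mod n i == 0))

-- sum(int(digit) for digit in str(num)): each digit char c has int(c) = c.toNat - 48
-- (exact here: str(num) is only taken for primes num ≥ 2, whose digits are '0'..'9').
def digit_sum (num : Int) : Int :=
  ((PySem.Int.toChars num).map (fun c => (c.toNat : Int) - 48)).sum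

def get_max_prime_with_pattern (arr : List Int) : Int :=
  arr.foldl
    (fun max_prime num =>
      if is_prime num then
        if PySem.Int.mod (digit_sum num) 3 == 0 then max max_prime num else max_prime
      else max_prime)
    (-1)

-- ===== PORT B =====
def get_max_prime_with_pattern_alt (arr : List Int) : Int :=
  if arr.contains 3 then 3 else -1

-- ===== PRECONDITION & SPEC =====
def Spec_get_max_prime_with_pattern (arr : List Int) (out : Int) : Prop := out = get_max_prime_with_pattern_alt arr
instance (arr : List Int) (out : Int) : Decidable (Spec_get_max_prime_with_pattern arr out) := by unfold Spec_get_max_prime_with_pattern; infer_instance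

-- ===== CLAIM (what is proved, stated in full; the proofs are below) =====
def Claim_equal_get_max_prime_with_pattern : Prop := ∀ (arr : List Int), Dom_get_max_prime_with_pattern arr → Spec_get_max_prime_with_pattern arr (get_max_prime_with_pattern arr)

-- ===== LEMMAS AND PROOFS =====

-- pin down Nat.sqrt on literals (Nat.sqrt is well-founded recursion, so 'decide' cannot)
lemma sqrt_eval (n k : Nat) (h1 : k * k ≤ n) (h2 : n < (k + 1) * (k + 1)) :
    Nat.sqrt n = k := by
  have ha : k ≤ Nat.sqrt n := Nat.le_sqrt.mpr h1
  have hb : Nat.sqrt n < k + 1 := Nat.sqrt_lt.mpr h2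
  omega

-- digit value of the chars Nat.toDigits emits
lemma val_digitChar (d : Nat) (hd : d < 10) :
    ((Nat.digitChar d).toNat : Int) - 48 = (d : Int) := by
  interval_cases d <;> decide

-- digit sum of toDigitsCore ≡ n + digit sum of the accumulator (mod 3), since 10 ≡ 1 (mod 3)
lemma toDigitsCore_sum_mod3 (f : Nat) : ∀ (n : Nat) (acc : List Char), n < f →
    ((Nat.toDigitsCore 10 f n acc).map (fun c => (c.toNat : Int) - 48)).sum % 3
      = ((n : Int) + (acc.map (fun c => (c.toNat : Int) - 48)).sum) % 3 := by
  induction f with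
  | zero => intro n acc h; omega
  | succ f ih =>
    intro n acc h
    rw [Nat.toDigitsCore]
    have hd : n % 10 < 10 := Nat.mod_lt _ (by norm_num)
    by_cases hq : n / 10 = 0
    · have hn : n % 10 = n := by omega
      simp only [hq, if_pos, List.map_cons, List.sum_cons]
      rw [hn, val_digitChar n (by omega)]
    · rw [if_neg hq]
      have hq' : n / 10 < f := by
        have := Nat.div_lt_self (by omega : 0 < n) (by norm_num : 1 < 10)
        omega
      rw [ih (n / 10) _ hq']
      simp only [List.map_cons, List.sum_cons, val_digitChar _ hd]
      have : n = 10 * (n / 10) + n % 10 := (Nat.div_add_mod n 10).symm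
      omega

-- for num ≥ 2, digit_sum num ≡ num (mod 3)
lemma digit_sum_mod3 (num : Int) (h : 2 ≤ num) : digit_sum num % 3 = num % 3 := by
  unfold digit_sum
  rw [show PySem.Int.toChars num = Nat.toDigits 10 num.toNat by
        unfold PySem.Int.toChars; rw [if_neg (by omega)]]
  unfold Nat.toDigits
  rw [toDigitsCore_sum_mod3 _ _ _ (Nat.lt_succ_self _)]
  simp only [List.map_nil, List.sum_nil, add_zero]
  omega

lemma two_le_of_is_prime (n : Int) (h : is_prime n = true) : 2 ≤ n := by
  by_contra hlt
  unfold is_prime at h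
  rw [if_pos (by omega)] at h
  exact absurd h (by simp)

lemma is_prime_three : is_prime 3 = true := by
  unfold is_prime
  rw [if_neg (by norm_num),
      show Nat.sqrt (Int.toNat 3) = 1 from sqrt_eval _ _ (by norm_num) (by norm_num)]
  decide

lemma is_prime_six : is_prime 6 = false := by
  unfold is_prime
  rw [if_neg (by norm_num),
      show Nat.sqrt (Int.toNat 6) = 2 from sqrt_eval _ _ (by norm_num) (by norm_num)]
  decide

lemma is_prime_nine : is_prime 9 = false := by
  unfold is_prime
  rw [if_neg (by norm_num),
      show Nat.sqrt (Int.toNat 9) = 3 from sqrt_eval _ _ (by norm_num) (by norm_num)]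
  decide

-- if n ≥ 2 is divisible by 3 and n ≠ 3, trial division finds a divisor
lemma is_prime_of_dvd3 (n : Int) (h2 : 2 ≤ n) (h3 : (3:Int) ∣ n) (hne : n ≠ 3) :
    is_prime n = false := by
  by_cases hsmall : n ≤ 9
  · have : n = 6 ∨ n = 9 := by omega
    rcases this with h | h <;> subst h
    · exact is_prime_six
    · exact is_prime_nine
  · -- n ≥ 12, so 3 ≤ sqrt n and the divisor 3 is tested by the loop
    have h12 : 12 ≤ n := by omega
    unfold is_prime
    rw [if_neg (by omega)]
    have hs : 3 ≤ Nat.sqrt n.toNat := Nat.le_sqrt.mpr (by omega)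
    rw [List.all_eq_false]
    refine ⟨3, ?_, ?_⟩
    · rw [PySem.List.mem_pyRange_one]
      refine ⟨by norm_num, ?_⟩
      have : (3 : Int) ≤ (Nat.sqrt n.toNat : Int) := by exact_mod_cast hs
      omega
    · simpa using h3

lemma ds3 : (PySem.Int.mod (digit_sum 3) 3 == 0) = true := by decide

-- the per-element step of A's fold keeps num iff num = 3
lemma step_fun (mp num : Int) :
    (if is_prime num then
       if PySem.Int.mod (digit_sum num) 3 == 0 then max mp num else mp
     else mp)
    = if num = 3 then max mp 3 else mp := by
  by_cases h3 : num = 3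
  · subst h3
    rw [if_pos rfl, if_pos is_prime_three, if_pos ds3]
  · rw [if_neg h3]
    by_cases hp : is_prime num = true
    · rw [if_pos hp]
      have h2 : 2 ≤ num := two_le_of_is_prime num hp
      by_cases hm : (PySem.Int.mod (digit_sum num) 3 == 0) = true
      · exfalso
        have hmod : PySem.Int.mod (digit_sum num) 3 = 0 := by
          exact of_decide_eq_true hm
        rw [PySem.Int.mod_eq_emod_of_pos (by norm_num)] at hmod
        have hnum : num % 3 = 0 := by rw [← digit_sum_mod3 num h2]; exact hmod
        have hdvd : (3:Int) ∣ num := Int.dvd_of_emod_eq_zero hnum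
        rw [is_prime_of_dvd3 num h2 hdvd h3] at hp
        exact absurd hp (by simp)
      · rw [if_neg hm]
    · rw [if_neg (by simpa using hp)]

-- fold characterisation: starting from -1 or 3, A's fold returns 3 iff 3 occurs
lemma fold_eq (arr : List Int) : ∀ (mp : Int), mp = -1 ∨ mp = 3 →
    arr.foldl
      (fun max_prime num =>
        if is_prime num then
          if PySem.Int.mod (digit_sum num) 3 == 0 then max max_prime num else max_prime
        else max_prime)
      mp = if arr.contains 3 then 3 else mp := by
  induction arr with
  | nil => intro mp _; simp
  | cons a t ih =>
    intro mp hmp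
    rw [List.foldl_cons, step_fun mp a]
    by_cases ha : a = 3
    · subst ha
      have hmax : max mp 3 = 3 := by rcases hmp with h | h <;> subst h <;> decide
      rw [if_pos rfl, hmax, ih 3 (Or.inr rfl)]
      simp
    · rw [if_neg ha, ih mp hmp]
      have h3a : ¬((3:Int) = a) := fun h => ha h.symm
      simp [h3a]

-- ===== VERDICT (by name: the statement is the Claim_ definition above) =====
theorem get_max_prime_with_pattern_spec : Claim_equal_get_max_prime_with_pattern := by
  intro arr _
  unfold Spec_get_max_prime_with_pattern get_max_prime_with_pattern get_max_prime_with_pattern_alt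
  exact fold_eq arr (-1) (Or.inl rfl)
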